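-- pv_equiv track=rewrite | github.com/Seedname/Wordle | script.py | get_string_score
-- ===== SOURCE A (Python) =====
-- def get_string_score(test_word: str, correct_word: str) -> str:
--     score = ["" for _ in range(5)]
--     possible_letters = {}
--
--     for i in range(len(test_word)):
--         test_letter = test_word[i]
--         correct_letter = correct_word[i]
--         if test_letter == correct_letter:
--             score[i] = '*'
--         elif test_letter not in correct_word:
--             score[i] = "!"
--         elif test_letter in correct_word:
--             if not possible_letters.get(test_letter):
--                 possible_letters[test_letter] = 0
--             possible_letters[test_letter] += 1
--
--     for i in range(len(test_word)):
--         if score[i] == "":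
--             letter = test_word[i]
--             possible_letters[letter] -= 1
--             if possible_letters[letter] >= 0:
--                 score[i] = "?"
--             else:
--                 score[i] = "!"
--
--     return ''.join(score)
-- ===== SOURCE B (Python) =====
-- def get_string_score(test_word: str, correct_word: str) -> str:
--     out = []
--     for i in range(len(test_word)):
--         t = test_word[i]
--         c = correct_word[i]
--         out.append('*' if t == c else '?' if t in correct_word else '!')
--     return ''.join(out)
-- ===== Notes on version B (the rewrite author's own statement) =====
-- stated objective: simpler
-- what changed: single pass classifying each letter directly ('*' exact, '?' present, '!' absent) replaces A's two passes over a fixed 5-slot score list with a dict of letter counts whose decrement test can never fire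
import Mathlib
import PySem

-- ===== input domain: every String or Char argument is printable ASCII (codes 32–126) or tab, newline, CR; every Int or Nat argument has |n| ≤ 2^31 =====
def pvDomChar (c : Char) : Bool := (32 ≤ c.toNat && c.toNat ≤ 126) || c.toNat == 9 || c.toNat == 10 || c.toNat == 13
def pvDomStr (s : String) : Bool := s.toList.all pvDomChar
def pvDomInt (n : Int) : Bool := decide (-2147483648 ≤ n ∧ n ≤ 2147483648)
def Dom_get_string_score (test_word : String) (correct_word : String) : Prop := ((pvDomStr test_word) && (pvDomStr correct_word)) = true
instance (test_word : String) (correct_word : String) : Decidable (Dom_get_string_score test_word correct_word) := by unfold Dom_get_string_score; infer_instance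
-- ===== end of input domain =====

-- B replaces A's two passes (fixed 5-slot score list plus a dict of letter counts whose
-- decrement test can never fail) by one pass classifying each letter directly: simpler.

-- ===== PORT A =====
-- Literal transliteration of A. Python raises IndexError exactly when len(test_word) > 5
-- (score[i] out of range) or len(correct_word) < len(test_word) (correct_word[i] out of
-- range); those inputs are excluded by Pre_ below, and under Pre_ the total forms
-- pyGetD/pySetD (and getD where Python reads possible_letters[letter], whose key is always
-- present at that point) are exact.
def get_string_score (test_word : String) (correct_word : String) : String :=
  let tw := test_word.toList
  let cw := correct_word.toList
  -- score = ["" for _ in range(5)]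
  let score : List String := (PySem.List.pyRange 0 5 1).map (fun _ => "")
  let possible_letters : PySem.Dict Char Int := PySem.Dict.empty
  -- first loop
  let st :=
    (PySem.List.pyRange 0 (PySem.List.len tw) 1).foldl
      (fun (st : List String × PySem.Dict Char Int) i =>
        let test_letter := PySem.List.pyGetD tw i ' '
        let correct_letter := PySem.List.pyGetD cw i ' '
        if test_letter == correct_letter then
          (PySem.List.pySetD st.1 i "*", st.2)
        else if !(PySem.Chars.isIn [test_letter] cw) then
          (PySem.List.pySetD st.1 i "!", st.2)
        else if PySem.Chars.isIn [test_letter] cw then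
          -- if not possible_letters.get(test_letter): possible_letters[test_letter] = 0
          let pl := if ((st.2.get? test_letter).getD 0) == 0 then st.2.insert test_letter 0 else st.2
          -- possible_letters[test_letter] += 1
          (st.1, pl.insert test_letter (pl.getD test_letter 0 + 1))
        else st)
      (score, possible_letters)
  -- second loop
  let st :=
    (PySem.List.pyRange 0 (PySem.List.len tw) 1).foldl
      (fun (st : List String × PySem.Dict Char Int) i =>
        if PySem.List.pyGetD st.1 i "" == "" then
          let letter := PySem.List.pyGetD tw i ' '
          -- possible_letters[letter] -= 1 (the key is always present here)
          let pl := st.2.insert letter (st.2.getD letter 0 - 1)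
          if 0 ≤ pl.getD letter 0 then
            (PySem.List.pySetD st.1 i "?", pl)
          else
            (PySem.List.pySetD st.1 i "!", pl)
        else st)
      st
  PySem.Str.join "" st.1

-- ===== PORT B =====
def get_string_score_alt (test_word : String) (correct_word : String) : String :=
  let tw := test_word.toList
  let cw := correct_word.toList
  let out : List String :=
    (PySem.List.pyRange 0 (PySem.List.len tw) 1).foldl
      (fun out i =>
        let t := PySem.List.pyGetD tw i ' '
        let c := PySem.List.pyGetD cw i ' '
        out ++ [if t == c then "*" else if PySem.Chars.isIn [t] cw then "?" else "!"])
      []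
  PySem.Str.join "" out

-- ===== PRECONDITION & SPEC =====
-- Pre_ excludes exactly the inputs on which A raises IndexError: a guess longer than the
-- fixed 5-slot score list, or a correct_word shorter than the guess.
def Pre_get_string_score (test_word : String) (correct_word : String) : Prop :=
  test_word.toList.length ≤ 5 ∧ test_word.toList.length ≤ correct_word.toList.length
instance (test_word : String) (correct_word : String) : Decidable (Pre_get_string_score test_word correct_word) := by unfold Pre_get_string_score; infer_instance
def pvWitness_get_string_score : String × String := ("crane", "crate")

def Spec_get_string_score (test_word : String) (correct_word : String) (out : String) : Prop := out = get_string_score_alt test_word correct_word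
instance (test_word : String) (correct_word : String) (out : String) : Decidable (Spec_get_string_score test_word correct_word out) := by unfold Spec_get_string_score; infer_instance

-- ===== CLAIM (what is proved, stated in full; the proofs are below) =====
def Claim_equal_get_string_score : Prop := ∀ (test_word : String) (correct_word : String), Dom_get_string_score test_word correct_word → Pre_get_string_score test_word correct_word → Spec_get_string_score test_word correct_word (get_string_score test_word correct_word)

-- ===== LEMMAS AND PROOFS =====
theorem pv_isIn_singleton (s : List Char) (c : Char) : PySem.Chars.isIn [c] s = s.contains c := by
  rcases h : s.contains c with _ | _
  · simp_all [PySem.Chars.isIn_eq_false_iff, List.singleton_infix_iff]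
  · rw [PySem.Chars.isIn_iff_infix, List.singleton_infix_iff]; simp_all
def pvMark1 (tw cw : List Char) (i : Nat) : String :=
  if tw[i]?.getD ' ' == cw[i]?.getD ' ' then "*" else if cw.contains (tw[i]?.getD ' ') then "" else "!"
def pvFinal (tw cw : List Char) (i : Nat) : String :=
  if tw[i]?.getD ' ' == cw[i]?.getD ' ' then "*" else if cw.contains (tw[i]?.getD ' ') then "?" else "!"
def pvP (tw cw : List Char) (ch : Char) (i : Nat) : Bool :=
  (tw[i]?.getD ' ' == ch) && !(tw[i]?.getD ' ' == cw[i]?.getD ' ') && cw.contains (tw[i]?.getD ' ')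
def pvCnt (tw cw : List Char) (j n : Nat) (ch : Char) : Int :=
  (((List.range' j (n - j)).filter (pvP tw cw ch)).length : Int)
def pvSc (tw cw : List Char) (j n : Nat) : List String :=
  (List.range 5).map (fun i => if i < j then pvFinal tw cw i else if i < n then pvMark1 tw cw i else "")
def pvStep1 (tw cw : List Char) (st : List String × PySem.Dict Char Int) (i : Int) : List String × PySem.Dict Char Int :=
  let test_letter := PySem.List.pyGetD tw i ' '
  let correct_letter := PySem.List.pyGetD cw i ' '
  if test_letter == correct_letter then
    (PySem.List.pySetD st.1 i "*", st.2)
  else if !(PySem.Chars.isIn [test_letter] cw) then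
    (PySem.List.pySetD st.1 i "!", st.2)
  else if PySem.Chars.isIn [test_letter] cw then
    let pl := if ((st.2.get? test_letter).getD 0) == 0 then st.2.insert test_letter 0 else st.2
    (st.1, pl.insert test_letter (pl.getD test_letter 0 + 1))
  else st
def pvLoop1 (tw cw : List Char) (m : Nat) : List String × PySem.Dict Char Int :=
  (PySem.List.pyRange 0 (m : Int) 1).foldl (pvStep1 tw cw)
    ((PySem.List.pyRange 0 5 1).map (fun _ => ""), PySem.Dict.empty)
theorem pv_set_map_range (k j : Nat) (f : Nat → String) (v : String) :
    ((List.range k).map f).set j v = (List.range k).map fun i => if i = j then v else f i := by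
  apply List.ext_getElem (by simp)
  intro i h1 h2
  simp only [List.getElem_set, List.getElem_map, List.getElem_range]
  by_cases hij : i = j <;> simp [hij, Ne.symm]
theorem pv_cnt_snoc (tw cw : List Char) (j n : Nat) (ch : Char) (h : j ≤ n) :
    pvCnt tw cw j (n + 1) ch = pvCnt tw cw j n ch + (if pvP tw cw ch n then 1 else 0) := by
  unfold pvCnt
  rw [show n + 1 - j = (n - j) + 1 from by omega, List.range'_concat, List.filter_append,
     show j + 1 * (n - j) = n from by omega]
  rcases h2 : pvP tw cw ch n <;> simp [List.filter, h2]
theorem pvSc_zero (tw cw : List Char) (n : Nat) :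
    pvSc tw cw 0 n = (List.range 5).map (fun i => if i < n then pvMark1 tw cw i else "") := by
  unfold pvSc; simp
theorem pv_loop1_spec (tw cw : List Char) (m : Nat) (h5 : m ≤ 5) :
    (pvLoop1 tw cw m).1 = pvSc tw cw 0 m
    ∧ ∀ ch, (pvLoop1 tw cw m).2.getD ch 0 = pvCnt tw cw 0 m ch := by
  induction m with
  | zero =>
    refine ⟨?_, fun ch => ?_⟩
    · rw [pvSc_zero]; rfl
    · unfold pvLoop1 pvCnt
      rw [PySem.List.pyRange_zero_nat]
      simp
  | succ m ih =>
    obtain ⟨ih1, ih2⟩ := ih (by omega)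
    have hsplit : pvLoop1 tw cw (m + 1) = pvStep1 tw cw (pvLoop1 tw cw m) (m : Int) := by
      unfold pvLoop1
      rw [show ((m + 1 : Nat) : Int) = (m : Int) + 1 by push_cast; ring,
          PySem.List.pyRange_one_succ_right (by positivity), List.foldl_append]
      simp
    have hget : PySem.List.pyGetD tw (m : Int) ' ' = tw[m]?.getD ' ' := by
      simp [List.getD_eq_getElem?_getD]
    have hgetc : PySem.List.pyGetD cw (m : Int) ' ' = cw[m]?.getD ' ' := by
      simp [List.getD_eq_getElem?_getD]
    rw [hsplit]
    unfold pvStep1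
    simp only [hget, hgetc, pv_isIn_singleton]
    have hfst : ∀ v : String, (v = pvMark1 tw cw m) →
        PySem.List.pySetD (pvLoop1 tw cw m).1 (m : Int) v = pvSc tw cw 0 (m + 1) := by
      intro v hv
      rw [ih1, pvSc_zero, pvSc_zero, PySem.List.pySetD_natCast, pv_set_map_range]
      apply List.map_congr_left
      intro i hi
      simp only [List.mem_range] at hi
      by_cases him : i = m
      · subst him; rw [if_pos rfl, if_pos (by omega), hv]
      · rw [if_neg him]
        by_cases hlt : i < m
        · rw [if_pos hlt, if_pos (by omega)]
        · rw [if_neg hlt, if_neg (by omega)]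
    by_cases heq : (tw[m]?.getD ' ' == cw[m]?.getD ' ') = true
    · rw [if_pos heq]
      refine ⟨hfst "*" (by unfold pvMark1; rw [if_pos heq]), fun ch => ?_⟩
      show (pvLoop1 tw cw m).2.getD ch 0 = _
      rw [ih2 ch, pv_cnt_snoc tw cw 0 m ch (by omega),
         show pvP tw cw ch m = false from by unfold pvP; rw [heq]; simp]
      simp
    · rcases hc : cw.contains (tw[m]?.getD ' ') with _ | _
      · rw [if_neg heq, if_pos (by simp)]
        refine ⟨hfst "!" (by unfold pvMark1; rw [if_neg heq, if_neg (by simpa using hc)]), fun ch => ?_⟩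
        show (pvLoop1 tw cw m).2.getD ch 0 = _
        rw [ih2 ch, pv_cnt_snoc tw cw 0 m ch (by omega),
           show pvP tw cw ch m = false from by unfold pvP; rw [hc]; simp]
        simp
      · rw [if_neg heq, if_neg (by simp), if_pos (by simp)]
        have hkeep : ∀ ch, ((if (((pvLoop1 tw cw m).2.get? (tw[m]?.getD ' ')).getD 0 == 0) = true
              then (pvLoop1 tw cw m).2.insert (tw[m]?.getD ' ') 0 else (pvLoop1 tw cw m).2)).getD ch 0
            = (pvLoop1 tw cw m).2.getD ch 0 := by
          intro ch
          split
          · next hz =>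
            rw [← PySem.Dict.getD_eq_get?_getD] at hz
            have hz' : (pvLoop1 tw cw m).2.getD (tw[m]?.getD ' ') 0 = 0 := by simpa using hz
            rw [PySem.Dict.getD_insert]
            split
            · next hch => rw [hch, hz']
            · rfl
          · rfl
        constructor
        · show (pvLoop1 tw cw m).1 = _
          rw [ih1, pvSc_zero, pvSc_zero]
          apply List.map_congr_left
          intro i hi
          simp only [List.mem_range] at hi
          by_cases him : i = m
          · subst him
            rw [if_neg (by omega), if_pos (by omega),
               show pvMark1 tw cw i = "" from by unfold pvMark1; rw [if_neg heq, if_pos hc]]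
          · by_cases hlt : i < m
            · rw [if_pos hlt, if_pos (by omega)]
            · rw [if_neg hlt, if_neg (by omega)]
        · intro ch
          show (PySem.Dict.insert _ (tw[m]?.getD ' ') _).getD ch 0 = _
          rw [PySem.Dict.getD_insert, pv_cnt_snoc tw cw 0 m ch (by omega)]
          by_cases hch : ch = tw[m]?.getD ' '
          · rw [if_pos hch, hkeep, ih2, hch,
               show pvP tw cw (tw[m]?.getD ' ') m = true from by unfold pvP; rw [hc]; simp_all]
            simp
          · rw [if_neg hch, hkeep, ih2,
               show pvP tw cw ch m = false from by
                 unfold pvP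
                 rcases hx : (tw[m]?.getD ' ' == ch) with _|_
                 · simp
                 · exact (hch (beq_iff_eq.mp hx).symm).elim]
            simp

def pvStep2 (tw : List Char) (st : List String × PySem.Dict Char Int) (i : Int) : List String × PySem.Dict Char Int :=
  if PySem.List.pyGetD st.1 i "" == "" then
    let letter := PySem.List.pyGetD tw i ' '
    let pl := st.2.insert letter (st.2.getD letter 0 - 1)
    if 0 ≤ pl.getD letter 0 then
      (PySem.List.pySetD st.1 i "?", pl)
    else
      (PySem.List.pySetD st.1 i "!", pl)
  else st

theorem pv_cnt_cons (tw cw : List Char) (j n : Nat) (ch : Char) (h : j < n) :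
    pvCnt tw cw j n ch = (if pvP tw cw ch j then 1 else 0) + pvCnt tw cw (j + 1) n ch := by
  unfold pvCnt
  rw [show n - j = (n - (j + 1)) + 1 from by omega, List.range'_succ]
  rcases h2 : pvP tw cw ch j <;> simp [List.filter, h2] <;> omega

theorem pv_loop2_spec (tw cw : List Char) (n : Nat) (hn : n ≤ 5) :
    ∀ (k j : Nat), j + k = n →
    ∀ pl : PySem.Dict Char Int, (∀ ch, pl.getD ch 0 = pvCnt tw cw j n ch) →
    ((PySem.List.pyRange (j : Int) (n : Int) 1).foldl (pvStep2 tw) (pvSc tw cw j n, pl)).1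
      = pvSc tw cw n n := by
  intro k
  induction k with
  | zero =>
    intro j hj pl hpl
    rw [show j = n from by omega, PySem.List.pyRange_one_eq_nil (by omega), List.foldl_nil]
  | succ k ihk =>
    intro j hj pl hpl
    have hjn : j < n := by omega
    rw [PySem.List.pyRange_one_cons (by exact_mod_cast hjn), List.foldl_cons]
    have hj5 : j < 5 := by omega
    have hsc : PySem.List.pyGetD (pvSc tw cw j n) (j : Int) "" = pvMark1 tw cw j := by
      rw [PySem.List.pyGetD_natCast]
      unfold pvSc
      simp [List.getD_eq_getElem?_getD, hj5, hjn]
    have hget : PySem.List.pyGetD tw (j : Int) ' ' = tw[j]?.getD ' ' := by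
      simp [List.getD_eq_getElem?_getD]
    unfold pvStep2
    simp only [hsc, hget]
    by_cases heq : (tw[j]?.getD ' ' == cw[j]?.getD ' ') = true
    · -- mark is "*": skip
      rw [if_neg (by unfold pvMark1; rw [if_pos heq]; decide)]
      rw [show pvSc tw cw j n = pvSc tw cw (j + 1) n from ?_]
      · exact ihk (j + 1) (by omega) pl (fun ch => by
          rw [hpl ch, pv_cnt_cons tw cw j n ch hjn,
             show pvP tw cw ch j = false from by unfold pvP; rw [heq]; simp]
          simp)
      · unfold pvSc
        apply List.map_congr_left
        intro i hi
        simp only [List.mem_range] at hi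
        by_cases him : i = j
        · subst him
          rw [if_neg (by omega), if_pos (by omega), if_pos (by omega),
             show pvFinal tw cw i = pvMark1 tw cw i from by
               unfold pvFinal pvMark1; rw [if_pos heq, if_pos heq]]
        · by_cases hlt : i < j
          · rw [if_pos hlt, if_pos (by omega)]
          · rw [if_neg hlt, if_neg (show ¬ i < j + 1 from by omega)]
    · rcases hc : cw.contains (tw[j]?.getD ' ') with _ | _
      · -- mark is "!": skip
        rw [if_neg (by unfold pvMark1; rw [if_neg heq, if_neg (by simpa using hc)]; decide)]
        rw [show pvSc tw cw j n = pvSc tw cw (j + 1) n from ?_]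
        · exact ihk (j + 1) (by omega) pl (fun ch => by
            rw [hpl ch, pv_cnt_cons tw cw j n ch hjn,
               show pvP tw cw ch j = false from by unfold pvP; rw [hc]; simp]
            simp)
        · unfold pvSc
          apply List.map_congr_left
          intro i hi
          simp only [List.mem_range] at hi
          by_cases him : i = j
          · subst him
            rw [if_neg (by omega), if_pos (by omega), if_pos (by omega),
               show pvFinal tw cw i = pvMark1 tw cw i from by
                 unfold pvFinal pvMark1
                 rw [if_neg heq, if_neg heq, if_neg (by simpa using hc), if_neg (by simpa using hc)]]
          · by_cases hlt : i < j
            · rw [if_pos hlt, if_pos (by omega)]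
            · rw [if_neg hlt, if_neg (show ¬ i < j + 1 from by omega)]
      · -- mark is "": decrement, stays ≥ 0, write "?"
        rw [if_pos (by rw [show pvMark1 tw cw j = "" from by unfold pvMark1; rw [if_neg heq, if_pos hc]]; decide)]
        have hP : pvP tw cw (tw[j]?.getD ' ') j = true := by
          unfold pvP; rw [hc]; simp_all
        have hval : pl.getD (tw[j]?.getD ' ') 0 - 1 = pvCnt tw cw (j + 1) n (tw[j]?.getD ' ') := by
          rw [hpl, pv_cnt_cons tw cw j n _ hjn, hP]
          simp
        have hnonneg : 0 ≤ (pl.insert (tw[j]?.getD ' ') (pl.getD (tw[j]?.getD ' ') 0 - 1)).getD (tw[j]?.getD ' ') 0 := by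
          rw [PySem.Dict.getD_insert, if_pos rfl, hval]
          unfold pvCnt
          positivity
        rw [if_pos hnonneg]
        have hscset : PySem.List.pySetD (pvSc tw cw j n) (j : Int) "?" = pvSc tw cw (j + 1) n := by
          rw [PySem.List.pySetD_natCast]
          unfold pvSc
          rw [pv_set_map_range]
          apply List.map_congr_left
          intro i hi
          simp only [List.mem_range] at hi
          by_cases him : i = j
          · subst him
            rw [if_pos rfl, if_pos (by omega),
               show pvFinal tw cw i = "?" from by unfold pvFinal; rw [if_neg heq, if_pos hc]]
          · rw [if_neg him]
            by_cases hlt : i < j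
            · rw [if_pos hlt, if_pos (by omega)]
            · rw [if_neg hlt, if_neg (show ¬ i < j + 1 from by omega)]
        rw [hscset]
        exact ihk (j + 1) (by omega) _ (fun ch => by
          rw [PySem.Dict.getD_insert]
          by_cases hch : ch = tw[j]?.getD ' '
          · rw [if_pos hch, hch, hval]
          · rw [if_neg hch, hpl ch, pv_cnt_cons tw cw j n ch hjn,
               show pvP tw cw ch j = false from by
                 unfold pvP
                 rcases hx : (tw[j]?.getD ' ' == ch) with _|_
                 · simp
                 · exact (hch (beq_iff_eq.mp hx).symm).elim]
            simp)

theorem pv_join_nil_flatten (ps : List (List Char)) : PySem.Chars.join [] ps = ps.flatten := by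
  induction ps with
  | nil => rfl
  | cons a t ih => cases t with
    | nil => rw [PySem.Chars.join_singleton]; simp
    | cons b u => rw [PySem.Chars.join_cons_cons]; simp_all

theorem pv_join_pad (g : Nat → String) (n : Nat) (hn : n ≤ 5) :
    PySem.Str.join "" ((List.range 5).map (fun i => if i < n then g i else ""))
      = PySem.Str.join "" ((List.range n).map g) := by
  refine String.toList_inj.mp ?_
  interval_cases n <;>
    simp [List.range_succ, PySem.Str.toList_join, pv_join_nil_flatten]

theorem pv_alt_eq (tw cw : String) :
    get_string_score_alt tw cw
      = PySem.Str.join "" ((List.range tw.toList.length).map (pvFinal tw.toList cw.toList)) := by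
  show PySem.Str.join "" (List.foldl (fun out i => out ++ [if (PySem.List.pyGetD tw.toList i ' ' == PySem.List.pyGetD cw.toList i ' ') then "*" else if PySem.Chars.isIn [PySem.List.pyGetD tw.toList i ' '] cw.toList then "?" else "!"]) [] (PySem.List.pyRange 0 (PySem.List.len tw.toList) 1)) = _
  rw [PySem.List.foldl_append_singleton_eq_map (f := fun i => if (PySem.List.pyGetD tw.toList i ' ' == PySem.List.pyGetD cw.toList i ' ') then "*" else if PySem.Chars.isIn [PySem.List.pyGetD tw.toList i ' '] cw.toList then "?" else "!")]
  rw [PySem.List.len_eq, PySem.List.pyRange_one]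
  congr 1
  simp [pvFinal, pv_isIn_singleton, List.getD_eq_getElem?_getD]

theorem pvSc_final (tw cw : List Char) (n : Nat) :
    pvSc tw cw n n = (List.range 5).map (fun i => if i < n then pvFinal tw cw i else "") := by
  unfold pvSc
  apply List.map_congr_left
  intro i _
  by_cases h : i < n
  · rw [if_pos h, if_pos h]
  · rw [if_neg h, if_neg h, if_neg h]

-- ===== VERDICT (by name: the statement is the Claim_ definition above) =====
theorem get_string_score_spec : Claim_equal_get_string_score := by
  intro tw cw _ hpre
  obtain ⟨h5, hlen⟩ := hpre
  unfold Spec_get_string_score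
  rw [pv_alt_eq]
  show PySem.Str.join ""
      ((PySem.List.pyRange ((0 : Nat) : Int) ((tw.toList.length : Nat) : Int) 1).foldl
        (pvStep2 tw.toList) (pvLoop1 tw.toList cw.toList tw.toList.length)).1 = _
  obtain ⟨h1, h2⟩ := pv_loop1_spec tw.toList cw.toList tw.toList.length h5
  have hpair : pvLoop1 tw.toList cw.toList tw.toList.length
      = (pvSc tw.toList cw.toList 0 tw.toList.length, (pvLoop1 tw.toList cw.toList tw.toList.length).2) := by
    rw [← h1]
  rw [hpair,
     pv_loop2_spec tw.toList cw.toList tw.toList.length h5 tw.toList.length 0 (by omega)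
       (pvLoop1 tw.toList cw.toList tw.toList.length).2 h2,
     pvSc_final, pv_join_pad _ _ h5]
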